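-- pv_equiv track=rewrite | github.com/leporia/scout-subs | server/views.py | split_codes
-- ===== SOURCE A (Python) =====
-- def split_codes(str):
--     out = []
--     buffer = ""
--     for i in str:
--         if i.isdigit() or i == "U":
--             buffer += i
--             continue
--
--         if i == "\n":
--             out.append(buffer)
--             buffer = ""
--
--     if buffer != "":
--         out.append(buffer)
--
--     return out
-- ===== SOURCE B (Python) =====
-- def split_codes(str):
--     parts = ["".join(c for c in line if c.isdigit() or c == "U")
--              for line in str.split("\n")]
--     if parts[-1] == "":
--         parts.pop()
--     return parts
-- ===== Notes on version B (the rewrite author's own statement) =====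
-- stated objective: simpler
-- what changed: Replaces the character-by-character state machine (explicit buffer, mid-loop continue, trailing-buffer flush) by splitting on newlines and filtering each line with a comprehension, dropping the last part when it is empty.
import Mathlib
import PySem

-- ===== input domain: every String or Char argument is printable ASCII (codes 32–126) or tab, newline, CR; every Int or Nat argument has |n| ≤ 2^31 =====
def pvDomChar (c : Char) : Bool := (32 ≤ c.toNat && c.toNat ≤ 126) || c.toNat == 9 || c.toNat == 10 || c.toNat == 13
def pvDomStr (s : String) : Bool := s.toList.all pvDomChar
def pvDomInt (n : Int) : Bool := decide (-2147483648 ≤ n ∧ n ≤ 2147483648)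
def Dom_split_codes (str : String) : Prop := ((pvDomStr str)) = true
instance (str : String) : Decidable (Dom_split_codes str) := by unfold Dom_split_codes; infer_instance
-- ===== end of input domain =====

-- B replaces A's character state machine by split('\n') + per-line filtering (drop a trailing empty part); simpler decomposition, same cost.

-- the code-character predicate both versions filter by (Python: c.isdigit() or c == "U")
def codeChar (c : Char) : Bool := PySem.Chars.isdigit c || c == 'U'

-- ===== PORT A =====
def split_codes (str : String) : List String :=
  let st := str.toList.foldl
    (fun (st : List (List Char) × List Char) i =>
      if codeChar i then (st.1, st.2 ++ [i])
      else if i == '\n' then (st.1 ++ [st.2], []) else st)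
    ([], [])
  (if st.2 ≠ [] then st.1 ++ [st.2] else st.1).map String.ofList

-- ===== PORT B =====
def split_codes_alt (str : String) : List String :=
  let parts := (PySem.Chars.splitOn str.toList ['\n']).map (fun line => line.filter codeChar)
  (if PySem.List.pyGet? parts (-1) = some [] then parts.dropLast else parts).map String.ofList

-- ===== PRECONDITION & SPEC =====
def Spec_split_codes (str : String) (out : List String) : Prop := out = split_codes_alt str
instance (str : String) (out : List String) : Decidable (Spec_split_codes str out) := by unfold Spec_split_codes; infer_instance

-- ===== CLAIM (what is proved, stated in full; the proofs are below) =====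
def Claim_equal_split_codes : Prop := ∀ (str : String), Dom_split_codes str → Spec_split_codes str (split_codes str)

-- ===== LEMMAS AND PROOFS =====

-- proof-only model of splitting on '\n'
def linesNL : List Char → List (List Char)
  | [] => [[]]
  | c :: rest => if c = '\n' then [] :: linesNL rest else (linesNL rest).modifyHead (c :: ·)

theorem linesNL_ne_nil (cs : List Char) : linesNL cs ≠ [] := by
  cases cs with
  | nil => simp [linesNL]
  | cons c rest =>
    simp only [linesNL]
    split <;> simp [List.modifyHead_eq_nil_iff, linesNL_ne_nil rest]

theorem splitOn_go_eq (fuel : Nat) (l cur : List Char) (acc : List (List Char))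
    (h : l.length ≤ fuel) :
    PySem.Chars.splitOn.go ['\n'] fuel l cur acc
      = acc.reverse ++ (linesNL l).modifyHead (cur.reverse ++ ·) := by
  induction fuel generalizing l cur acc with
  | zero =>
    have : l = [] := List.length_eq_zero_iff.mp (Nat.le_zero.mp h)
    subst this
    simp [PySem.Chars.splitOn.go, linesNL]
  | succ fuel ih =>
    cases l with
    | nil => simp [PySem.Chars.splitOn.go, linesNL]
    | cons c rest =>
      simp only [PySem.Chars.splitOn.go]
      by_cases hc : c = '\n'
      · subst hc
        simp only [List.isPrefixOf, beq_self_eq_true, Bool.true_and,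
          if_pos]
        rw [ih _ _ _ (by simpa using Nat.le_of_succ_le_succ h)]
        cases hr : linesNL rest <;> simp [linesNL, hr]
      · have hp : List.isPrefixOf ['\n'] (c :: rest) = false := by
          simp [List.isPrefixOf]; exact fun h' => absurd h'.symm hc
        rw [hp]
        simp only [Bool.false_eq_true, if_false]
        rw [ih _ _ _ (by simpa using Nat.le_of_succ_le_succ h)]
        obtain ⟨m, ms, hm⟩ := List.exists_cons_of_ne_nil (linesNL_ne_nil rest)
        simp [linesNL, hc, hm, List.append_assoc]

theorem splitOn_eq_linesNL (cs : List Char) :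
    PySem.Chars.splitOn cs ['\n'] = linesNL cs := by
  unfold PySem.Chars.splitOn
  rw [splitOn_go_eq _ _ _ _ (by omega)]
  obtain ⟨m, ms, hm⟩ := List.exists_cons_of_ne_nil (linesNL_ne_nil cs)
  simp [hm]

-- A's loop, characterized by linesNL
theorem foldl_step_eq (cs : List Char) (out : List (List Char)) (buf : List Char) :
    cs.foldl
      (fun (st : List (List Char) × List Char) i =>
        if codeChar i then (st.1, st.2 ++ [i])
        else if i == '\n' then (st.1 ++ [st.2], []) else st)
      (out, buf)
      = (out ++ (((linesNL cs).map (fun l => l.filter codeChar)).modifyHead (buf ++ ·)).dropLast,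
         (((linesNL cs).map (fun l => l.filter codeChar)).modifyHead (buf ++ ·)).getLastD []) := by
  induction cs generalizing out buf with
  | nil => simp [linesNL]
  | cons c rest ih =>
    simp only [List.foldl_cons]
    by_cases hcode : codeChar c = true
    · have hc : c ≠ '\n' := by
        intro h; subst h; simp [codeChar, PySem.Chars.isdigit] at hcode
      rw [if_pos hcode, ih]
      obtain ⟨m, ms, hm⟩ := List.exists_cons_of_ne_nil (linesNL_ne_nil rest)
      simp [linesNL, hc, hm, hcode, List.append_assoc]
    · rw [if_neg hcode]
      by_cases hc : c = '\n'
      · subst hc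
        simp only [beq_self_eq_true, if_pos, ih]
        obtain ⟨m, ms, hm⟩ := List.exists_cons_of_ne_nil (linesNL_ne_nil rest)
        simp [linesNL, hm]
      · have : (c == '\n') = false := by simpa using hc
        rw [this]
        simp only [Bool.false_eq_true, if_false, ih]
        obtain ⟨m, ms, hm⟩ := List.exists_cons_of_ne_nil (linesNL_ne_nil rest)
        simp [linesNL, hc, hm, hcode]

-- ===== VERDICT (by name: the statement is the Claim_ definition above) =====
theorem split_codes_spec : Claim_equal_split_codes := by
  intro str _
  unfold Spec_split_codes split_codes split_codes_alt
  rw [splitOn_eq_linesNL, foldl_step_eq]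
  obtain ⟨m, ms, hm⟩ := List.exists_cons_of_ne_nil
    (show (linesNL str.toList).map (fun l => l.filter codeChar) ≠ [] by
      simp [linesNL_ne_nil])
  simp only [hm, List.modifyHead_cons, List.nil_append]
  have hne : m :: ms ≠ [] := by simp
  have hget : PySem.List.pyGet? (m :: ms) (-1) = (m :: ms).getLast? := by
    simp [PySem.List.pyGet?, PySem.List.pyIdx?, List.getLast?_eq_getElem?]
  have hgl : (m :: ms).getLast? = some ((m :: ms).getLast hne) :=
    List.getLast?_eq_some_getLast hne
  by_cases hlast : (m :: ms).getLast hne = []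
  · rw [if_neg (by simp [List.getLastD_eq_getLast?, hgl, hlast]), hget,
      if_pos (by rw [hgl, hlast])]
  · rw [if_pos (by simp [List.getLastD_eq_getLast?, hgl, hlast]), hget,
      if_neg (by simp [hgl, hlast])]
    rw [List.getLastD_eq_getLast?, hgl]
    simp [List.dropLast_concat_getLast hne]
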